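-- pv_equiv track=rewrite | github.com/seonjaechoi0307/TIL | Self-Study/Code_Test/School_Programers_Traning/2023-11-28.py | solution
-- ===== SOURCE A (Python) =====
-- def solution(arr, k):
--
--     # 솔루션 정의
--     # 랜덤으로 서로 다른 k개의 수를 저장한 배열을 만드려고 합니다.
--     # 적절한 방법이 떠오르지 않기 때문에 일정한 범위 내에서 무작위로 수를 뽑은 후
--     # 지금까지 나온적이 없는 수이면 배열 맨 뒤에 추가하는 방식으로 만들기로 합니다.
--
--     # 이미 어떤 수가 무작위로 주어질지 알고 있다고 가정하고, 실제 만들어질 길이 k의 배열을 예상해봅시다.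
--     # 정수 배열 arr가 주어집니다. 문제에서의 무작위의 수는 arr에 저장된 순서대로 주어질 예정이라고 했을 때
--     # 완성될 배열을 return 하는 solution 함수를 완성해 주세요.
--     # 단, 완성될 배열의 길이가 k보다 작으면 나머지 값을 전부 -1로 채워서 return 합니다.
--
--     n = len(arr)
--     answer = []
--
--     for i in range(n) :
--
--         if arr[i] not in answer and len(answer) < k :
--             answer.append(arr[i])
--
--     if k > len(answer) :
--         answer.extend([-1] * (k-len(answer)))
--
--     return answer
-- ===== SOURCE B (Python) =====
-- def solution(arr, k):
--     # Sieve: repeatedly take the head of the remainder and filter all its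
--     # duplicates out of the rest; no membership test is ever performed.
--     out = []
--     rest = arr
--     while k > len(out) and rest:
--         x = rest[0]
--         out.append(x)
--         rest = [y for y in rest[1:] if y != x]
--     return out + [-1] * (k - len(out))
-- ===== Notes on version B (the rewrite author's own statement) =====
-- stated objective: alternative
-- what changed: Replaces A's single pass with a per-element membership scan of the growing answer by a sieve: repeatedly pop the head of the remaining list and filter all of its duplicates out of the remainder (no membership test at all), then pad arithmetically.
import Mathlib
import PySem

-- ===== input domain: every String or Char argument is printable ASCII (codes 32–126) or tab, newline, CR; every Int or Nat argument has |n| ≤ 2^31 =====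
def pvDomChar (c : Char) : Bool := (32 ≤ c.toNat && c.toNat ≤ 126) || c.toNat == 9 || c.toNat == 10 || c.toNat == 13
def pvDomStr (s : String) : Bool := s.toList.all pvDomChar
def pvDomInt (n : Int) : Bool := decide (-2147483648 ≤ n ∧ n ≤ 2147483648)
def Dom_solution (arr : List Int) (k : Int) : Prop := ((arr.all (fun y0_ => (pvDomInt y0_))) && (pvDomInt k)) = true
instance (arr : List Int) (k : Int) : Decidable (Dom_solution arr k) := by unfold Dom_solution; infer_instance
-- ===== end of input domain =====

-- B replaces A's membership-scan loop by a sieve (pop the head, filter its duplicates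
-- out of the remainder, no membership test) with arithmetic padding (alternative).

-- ===== PORT A =====
-- for i in range(n): if arr[i] not in answer and len(answer) < k: answer.append(arr[i])
def solution (arr : List Int) (k : Int) : List Int :=
  let answer :=
    arr.foldl (fun ans x =>
      if ans.contains x = false ∧ (ans.length : Int) < k then ans ++ [x] else ans) []
  if k > (answer.length : Int) then
    answer ++ List.replicate (k - (answer.length : Int)).toNat (-1)
  else answer

-- ===== PORT B =====
-- while k > len(out) and rest: x = rest[0]; out.append(x); rest = [y for y in rest[1:] if y != x]
def sieveLoop (k : Int) (out rest : List Int) : List Int :=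
  if (out.length : Int) < k then
    match rest with
    | [] => out
    | x :: r => sieveLoop k (out ++ [x]) (r.filter (fun y => decide (y ≠ x)))
  else out
termination_by rest.length
decreasing_by
  calc (List.filter _ r.attach).unattach.length
      ≤ r.attach.unattach.length := by
        simp only [List.unattach, List.length_map]
        exact List.length_filter_le _ _
    _ < (x :: r).length := by simp [List.unattach_attach]

-- out + [-1] * (k - len(out))
def solution_alt (arr : List Int) (k : Int) : List Int :=
  let out := sieveLoop k [] arr
  out ++ List.replicate (k - (out.length : Int)).toNat (-1)

-- ===== PRECONDITION & SPEC =====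
def Spec_solution (arr : List Int) (k : Int) (out : List Int) : Prop := out = solution_alt arr k
instance (arr : List Int) (k : Int) (out : List Int) : Decidable (Spec_solution arr k out) := by unfold Spec_solution; infer_instance

-- ===== CLAIM (what is proved, stated in full; the proofs are below) =====
def Claim_equal_solution : Prop := ∀ (arr : List Int) (k : Int), Dom_solution arr k → Spec_solution arr k (solution arr k)

-- ===== LEMMAS AND PROOFS =====

-- Invariant: A's fold starting from `s.take k.toNat` is the `k.toNat`-prefix of the
-- unbounded dedup fold starting from `s`.
theorem solution_fold_take (k : Int) :
    ∀ (arr s : List Int),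
      arr.foldl (fun ans x =>
          if ans.contains x = false ∧ (ans.length : Int) < k then ans ++ [x] else ans)
        (s.take k.toNat)
      = (arr.foldl PySem.Set.add s).take k.toNat := by
  intro arr
  induction arr with
  | nil => intro s; rfl
  | cons x xs ih =>
    intro s
    simp only [List.foldl_cons]
    have hmin : (s.take k.toNat).length = min k.toNat s.length := List.length_take
    by_cases hmem : x ∈ s
    · rw [show PySem.Set.add s x = s from by simp [PySem.Set.add, PySem.Set.contains, hmem]]
      by_cases ha : x ∈ s.take k.toNat
      · rw [if_neg (by simp [ha])]; exact ih s
      · have hfl : s.length < k.toNat → s.take k.toNat = s :=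
          fun h => List.take_of_length_le (Nat.le_of_lt h)
        have hlen : (s.take k.toNat).length = k.toNat := by
          rcases Nat.lt_or_ge s.length k.toNat with h | h
          · exact absurd (by simpa [hfl h] using hmem) ha
          · omega
        rw [if_neg (fun h => by rw [hlen] at h; omega)]
        exact ih s
    · rw [show PySem.Set.add s x = s ++ [x] from by
        simp [PySem.Set.add, PySem.Set.contains, hmem]]
      have hax : x ∉ s.take k.toNat := fun h => hmem (List.mem_of_mem_take h)
      by_cases hk1 : ((s.take k.toNat).length : Int) < k
      · have hlt : s.length < k.toNat := by omega
        have hfull : s.take k.toNat = s := List.take_of_length_le (Nat.le_of_lt hlt)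
        have hx1 : (s ++ [x]).take k.toNat = s ++ [x] :=
          List.take_of_length_le (by simp; omega)
        rw [if_pos ⟨by simp [hax], hk1⟩, hfull]
        have := ih (s ++ [x]); rw [hx1] at this; exact this
      · have hlenk : k.toNat ≤ s.length := by omega
        have htake : (s ++ [x]).take k.toNat = s.take k.toNat :=
          List.take_append_of_le_length hlenk
        rw [if_neg (fun h => hk1 h.2)]
        have := ih (s ++ [x]); rw [htake] at this; exact this

-- A's loop computes the k.toNat-prefix of the order-preserving dedup of arr.
theorem solution_answer_eq (arr : List Int) (k : Int) :
    arr.foldl (fun ans x =>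
        if ans.contains x = false ∧ (ans.length : Int) < k then ans ++ [x] else ans) []
    = (PySem.List.dedup arr).take k.toNat := by
  have h := solution_fold_take k arr []
  simpa [PySem.List.dedup, PySem.Set.ofList, PySem.Set.empty] using h

-- Dedup fold ignores duplicates of an element already in the accumulator.
theorem foldl_add_filter_mem (x : Int) :
    ∀ (l s : List Int), x ∈ s →
      List.foldl PySem.Set.add s (l.filter (fun y => decide (y ≠ x)))
      = List.foldl PySem.Set.add s l := by
  intro l
  induction l with
  | nil => intro s _; rfl
  | cons y ys ih =>
    intro s hx
    by_cases hyx : y = x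
    · subst hyx
      have hadd : PySem.Set.add s y = s := by
        simp [PySem.Set.add, PySem.Set.contains, hx]
      have hf : (y :: ys).filter (fun z => decide (z ≠ y)) = ys.filter (fun z => decide (z ≠ y)) := by simp
      rw [hf, ih s hx]
      simp [hadd]
    · have hx' : x ∈ PySem.Set.add s y := by
        simp [PySem.Set.add, PySem.Set.contains]
        split <;> simp [hx]
      have hf : (y :: ys).filter (fun z => decide (z ≠ x)) = y :: ys.filter (fun z => decide (z ≠ x)) := by simp [hyx]
      rw [hf]
      simp only [List.foldl_cons]
      exact ih _ hx'

-- The head of the accumulator survives the dedup fold when it never recurs in the list.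
theorem foldl_add_cons (x : Int) :
    ∀ (l s : List Int), (∀ y ∈ l, y ≠ x) →
      List.foldl PySem.Set.add (x :: s) l = x :: List.foldl PySem.Set.add s l := by
  intro l
  induction l with
  | nil => intro s _; rfl
  | cons y ys ih =>
    intro s hl
    have hyx : y ≠ x := hl y (by simp)
    have hadd : PySem.Set.add (x :: s) y = x :: PySem.Set.add s y := by
      simp [PySem.Set.add, PySem.Set.contains, hyx]
      split <;> simp_all
    simp only [List.foldl_cons, hadd]
    exact ih _ (fun y hy => hl y (by simp [hy]))

-- Sieve step on the dedup: popping the head and filtering it out.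
theorem dedup_cons_filter (x : Int) (r : List Int) :
    PySem.List.dedup (x :: r)
    = x :: PySem.List.dedup (r.filter (fun y => decide (y ≠ x))) := by
  have h1 : PySem.List.dedup (x :: r) = List.foldl PySem.Set.add [x] r := by
    simp [PySem.List.dedup, PySem.Set.ofList, PySem.Set.empty, PySem.Set.add,
      PySem.Set.contains]
  rw [h1, ← foldl_add_filter_mem x r [x] (by simp)]
  rw [foldl_add_cons x _ [] (by intro y hy; simpa using (List.of_mem_filter hy))]
  rfl

-- The sieve loop computes the k.toNat-prefix of the dedup, shifted by the accumulator.
theorem sieveLoop_eq (k : Int) :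
    ∀ (n : ℕ) (rest out : List Int), rest.length ≤ n →
      sieveLoop k out rest
      = out ++ (PySem.List.dedup rest).take (k - (out.length : Int)).toNat := by
  intro n
  induction n with
  | zero =>
    intro rest out h
    have : rest = [] := List.eq_nil_of_length_eq_zero (Nat.le_zero.mp h)
    subst this
    unfold sieveLoop
    split <;> simp [PySem.List.dedup, PySem.Set.ofList, PySem.Set.empty]
  | succ n ih =>
    intro rest out h
    unfold sieveLoop
    by_cases hk : (out.length : Int) < k
    · rw [if_pos hk]
      cases rest with
      | nil => simp [PySem.List.dedup, PySem.Set.ofList, PySem.Set.empty]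
      | cons x r =>
        have hlen : (r.filter (fun y => decide (y ≠ x))).length ≤ n := by
          have := List.length_filter_le (fun y => decide (y ≠ x)) r
          simp at h; omega
        have hstep : (match x :: r with
            | [] => out
            | x :: r => sieveLoop k (out ++ [x]) (List.filter (fun y => decide (y ≠ x)) r))
          = sieveLoop k (out ++ [x]) (r.filter (fun y => decide (y ≠ x))) := rfl
        rw [hstep, ih _ _ hlen, dedup_cons_filter]
        have htn : (k - (out.length : Int)).toNat
            = (k - ((out ++ [x]).length : Int)).toNat + 1 := by
          simp; omega
        rw [htn]
        simp [List.take_succ_cons]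
    · rw [if_neg hk]
      have : (k - (out.length : Int)).toNat = 0 := by omega
      simp [this]

-- ===== VERDICT (by name: the statement is the Claim_ definition above) =====
theorem solution_spec : Claim_equal_solution := by
  intro arr k _
  unfold Spec_solution solution solution_alt
  have hb := sieveLoop_eq k arr.length arr [] (le_refl _)
  simp only [List.length_nil, Nat.cast_zero, List.nil_append, Int.sub_zero] at hb
  simp only [solution_answer_eq arr k, hb]
  set head := (PySem.List.dedup arr).take k.toNat with hh
  by_cases hk : k > (head.length : Int)
  · simp [hk]
  · have : (k - (head.length : Int)).toNat = 0 := by omega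
    simp [hk, this]
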